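-- pv_equiv track=rewrite | github.com/jio-ping/coding-test | 159994.py | solution
-- ===== SOURCE A (Python) =====
-- def solution(cards1,cards2,goal):
--     for goal_sentence in goal:
--         if len(cards1)>0 and goal_sentence == cards1[0]:
--             cards1= cards1[1:]
--         elif len(cards2)>0 and goal_sentence == cards2[0] :
--             cards2= cards2[1:]
--         else:
--             return "No"
--     return "Yes"
-- ===== SOURCE B (Python) =====
-- def solution(cards1, cards2, goal):
--     i = j = 0
--     for g in goal:
--         if i < len(cards1) and g == cards1[i]:
--             i += 1
--         elif j < len(cards2) and g == cards2[j]: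
--             j += 1
--         else:
--             return "No"
--     return "Yes"
-- ===== Notes on version B (the rewrite author's own statement) =====
-- stated objective: faster
-- what changed: Replaces the repeated O(n) list-slicing (cards1 = cards1[1:]) with two integer index pointers advanced over the unchanged lists, one O(1) step per goal word.
import Mathlib
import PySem

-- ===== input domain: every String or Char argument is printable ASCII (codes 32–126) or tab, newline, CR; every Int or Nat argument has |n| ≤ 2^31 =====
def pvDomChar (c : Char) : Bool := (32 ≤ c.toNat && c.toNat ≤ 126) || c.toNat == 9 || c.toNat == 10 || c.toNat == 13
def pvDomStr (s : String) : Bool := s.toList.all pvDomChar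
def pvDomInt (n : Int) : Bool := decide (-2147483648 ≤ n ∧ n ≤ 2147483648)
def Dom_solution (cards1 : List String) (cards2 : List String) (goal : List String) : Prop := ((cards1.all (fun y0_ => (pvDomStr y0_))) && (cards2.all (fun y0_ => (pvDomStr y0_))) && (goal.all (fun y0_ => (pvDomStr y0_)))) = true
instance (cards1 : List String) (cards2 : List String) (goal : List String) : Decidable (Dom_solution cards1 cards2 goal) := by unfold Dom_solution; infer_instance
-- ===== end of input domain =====

-- B replaces A's repeated list slicing with two index pointers over the unchanged lists (faster).
-- ===== PORT A =====
-- A: pop the matching head by slicing (cards1 = cards1[1:]); recursion over goal with shrinking lists.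
def solution (cards1 : List String) (cards2 : List String) (goal : List String) : String :=
  match goal with
  | [] => "Yes"
  | g :: gs =>
    if 0 < cards1.length ∧ cards1.head? = some g then
      solution (PySem.List.slice cards1 (some 1) none) cards2 gs
    else if 0 < cards2.length ∧ cards2.head? = some g then
      solution cards1 (PySem.List.slice cards2 (some 1) none) gs
    else "No"

-- ===== PORT B =====
-- B: two index pointers i, j into the fixed lists; the loop over goal carries (i, j).
def solutionAltGo (cards1 : List String) (cards2 : List String) (i j : Nat) : List String → String
  | [] => "Yes"
  | g :: gs =>
    if i < cards1.length ∧ cards1[i]? = some g then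
      solutionAltGo cards1 cards2 (i + 1) j gs
    else if j < cards2.length ∧ cards2[j]? = some g then
      solutionAltGo cards1 cards2 i (j + 1) gs
    else "No"

def solution_alt (cards1 : List String) (cards2 : List String) (goal : List String) : String :=
  solutionAltGo cards1 cards2 0 0 goal

-- ===== PRECONDITION & SPEC =====
def Spec_solution (cards1 : List String) (cards2 : List String) (goal : List String) (out : String) : Prop := out = solution_alt cards1 cards2 goal
instance (cards1 : List String) (cards2 : List String) (goal : List String) (out : String) : Decidable (Spec_solution cards1 cards2 goal out) := by unfold Spec_solution; infer_instance

-- ===== CLAIM (what is proved, stated in full; the proofs are below) =====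
def Claim_equal_solution : Prop := ∀ (cards1 : List String) (cards2 : List String) (goal : List String), Dom_solution cards1 cards2 goal → Spec_solution cards1 cards2 goal (solution cards1 cards2 goal)

-- ===== LEMMAS AND PROOFS =====

-- ===== VERDICT (by name: the statement is the Claim_ definition above) =====
-- key invariant: the pointer version on (i, j) computes A on the dropped suffixes
theorem go_eq (goal : List String) : ∀ (c1 c2 : List String) (i j : Nat),
    solutionAltGo c1 c2 i j goal = solution (c1.drop i) (c2.drop j) goal := by
  induction goal with
  | nil => intro c1 c2 i j; rfl
  | cons g gs ih =>
    intro c1 c2 i j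
    simp only [solutionAltGo, solution, PySem.List.slice_from_one, List.head?_drop,
      List.length_drop]
    have h1 : (0 < c1.length - i ∧ c1[i]? = some g) ↔ (i < c1.length ∧ c1[i]? = some g) := by
      constructor <;> (rintro ⟨h, h'⟩; exact ⟨by omega, h'⟩)
    have h2 : (0 < c2.length - j ∧ c2[j]? = some g) ↔ (j < c2.length ∧ c2[j]? = some g) := by
      constructor <;> (rintro ⟨h, h'⟩; exact ⟨by omega, h'⟩)
    rw [if_congr h1 rfl rfl, if_congr h2 rfl rfl]
    split_ifs with ha hb
    · rw [ih]
      simp [List.tail_drop]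
    · rw [ih]
      simp [List.tail_drop]
    · rfl

theorem solution_spec : Claim_equal_solution := by
  intro c1 c2 g _
  unfold Spec_solution solution_alt
  rw [go_eq]
  simp
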